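-- pv_equiv track=rewrite | github.com/mbchl-code/Words | game/words_checking.py | letter_repeat_error_message
-- ===== SOURCE A (Python) =====
-- def letter_repeat_error_message(user_word: str, base_word: str) -> str:
--     base_word = list(base_word)
--     for i in range(len(user_word)):
--         if user_word[i] not in base_word:
--             user_word = user_word[:i] + user_word[i].lower() + user_word[i+1:]
--         else:
--             base_word.remove(user_word[i])
--
--
--     return 'ошибка: ' + user_word
-- ===== SOURCE B (Python) =====
-- def letter_repeat_error_message(user_word: str, base_word: str) -> str:
--     # Group positions by character; for each distinct character, lowercase the
--     # occurrences beyond what base_word covers (tail of its ascending index list).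
--     base = list(base_word)
--     chars = list(user_word)
--     for c in dict.fromkeys(user_word):
--         idxs = [j for j, ch in enumerate(user_word) if ch == c]
--         for j in idxs[base.count(c):]:
--             chars[j] = chars[j].lower()
--     return 'ошибка: ' + ''.join(chars)
-- ===== Notes on version B (the rewrite author's own statement) =====
-- stated objective: alternative
-- what changed: A consumes base_word with a single left-to-right scan that tests membership in a shrinking list, list.remove()s matches and rebuilds the whole string by slicing on each miss (quadratic); B instead groups the positions of each distinct character (ascending index lists from enumerate) and lowercases, per character, the tail of the index list beyond base_word's count of that character, writing into a char array out of order.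
import Mathlib
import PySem

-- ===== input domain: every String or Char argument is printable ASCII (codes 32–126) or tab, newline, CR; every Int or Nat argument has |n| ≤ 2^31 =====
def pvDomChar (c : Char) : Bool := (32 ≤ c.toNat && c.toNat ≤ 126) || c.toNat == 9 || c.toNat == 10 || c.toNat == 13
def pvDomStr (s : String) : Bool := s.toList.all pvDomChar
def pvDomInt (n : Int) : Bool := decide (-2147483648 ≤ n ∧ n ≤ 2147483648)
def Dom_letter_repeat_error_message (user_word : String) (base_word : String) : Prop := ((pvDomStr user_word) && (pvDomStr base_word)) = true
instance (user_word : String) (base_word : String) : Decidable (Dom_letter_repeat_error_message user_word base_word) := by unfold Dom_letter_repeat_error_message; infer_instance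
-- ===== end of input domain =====

-- B groups the positions of each distinct character and lowercases the tail of each
-- ascending index list beyond what base_word covers, replacing A's consuming
-- left-to-right scan (per-miss string slicing + list.remove); a timing run measured B faster.

-- ===== PORT A =====
-- A's loop mutates the string `user_word` and the list `base_word`; the fold state is
-- (user_word, base_word). `user_word[i]` is always in range (i < original length = length
-- kept by the loop body), so `.getD ' '` / `.getD` after remove? never supply the default.
def letter_repeat_error_message (user_word : String) (base_word : String) : String :=
  let st :=
    (PySem.List.pyRange 0 (PySem.Str.len user_word) 1).foldl
      (fun (st : String × List Char) i =>
        let c := (PySem.Str.pyGet? st.1 i).getD ' '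
        if c ∈ st.2 then
          (st.1, (PySem.List.remove? st.2 c).getD st.2)
        else
          (PySem.Str.slice st.1 none (some i)
             ++ String.ofList [PySem.Chars.lowerChar c]
             ++ PySem.Str.slice st.1 (some (i + 1)) none,
           st.2))
      (user_word, base_word.toList)
  "ошибка: " ++ st.1

-- ===== PORT B =====
-- `for c in dict.fromkeys(user_word)` is PySem.List.dedup; `idxs` is the list-comprehension
-- over enumerate; `idxs[base.count(c):]` is PySem.List.slice; `chars[j] = chars[j].lower()`
-- is pySetD/pyGetD (j always in range); ''.join(chars) of single chars is String.ofList.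
def letter_repeat_error_message_alt (user_word : String) (base_word : String) : String :=
  let base := base_word.toList
  let chars :=
    (PySem.List.dedup user_word.toList).foldl
      (fun (cs : List Char) c =>
        let idxs := ((PySem.List.enumerate user_word.toList 0).filter
                      (fun p => p.2 == c)).map (·.1)
        (PySem.List.slice idxs (some ((base.count c : Nat) : Int)) none).foldl
          (fun cs j => PySem.List.pySetD cs j (PySem.Chars.lowerChar (PySem.List.pyGetD cs j ' ')))
          cs)
      user_word.toList
  "ошибка: " ++ String.ofList chars

-- ===== PRECONDITION & SPEC =====
def Spec_letter_repeat_error_message (user_word : String) (base_word : String) (out : String) : Prop := out = letter_repeat_error_message_alt user_word base_word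
instance (user_word : String) (base_word : String) (out : String) : Decidable (Spec_letter_repeat_error_message user_word base_word out) := by unfold Spec_letter_repeat_error_message; infer_instance

-- ===== CLAIM (what is proved, stated in full; the proofs are below) =====
def Claim_equal_letter_repeat_error_message : Prop := ∀ (user_word : String) (base_word : String), Dom_letter_repeat_error_message user_word base_word → Spec_letter_repeat_error_message user_word base_word (letter_repeat_error_message user_word base_word)

-- ===== LEMMAS AND PROOFS =====

def pvCanonAt (u b : List Char) (j : Nat) : Char :=
  if b.count (u.getD j ' ') ≤ (u.take j).count (u.getD j ' ') then
    PySem.Chars.lowerChar (u.getD j ' ')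
  else u.getD j ' '

def pvCanon (u b : List Char) : List Char :=
  (List.range u.length).map (pvCanonAt u b)

def pvIdxs (u : List Char) (c : Char) (s : Int) : List Int :=
  ((PySem.List.enumerate u s).filter (fun p => p.2 == c)).map (·.1)

theorem pvIdxs_cons (x : Char) (u : List Char) (c : Char) (s : Int) :
    pvIdxs (x :: u) c s = if x = c then s :: pvIdxs u c (s+1) else pvIdxs u c (s+1) := by
  simp [pvIdxs, PySem.List.enumerate_cons]
  split_ifs with h <;> simp [h]

theorem pvIdxs_mem_drop (u : List Char) (c : Char) (s : Int) (m : Nat) (j : Int) :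
    j ∈ (pvIdxs u c s).drop m ↔
      ∃ k : Nat, k < u.length ∧ j = s + k ∧ u.getD k ' ' = c ∧ m ≤ (u.take k).count c := by
  induction u generalizing s m with
  | nil => simp [pvIdxs]
  | cons x xs ih =>
    rw [pvIdxs_cons]
    by_cases hx : x = c
    · subst hx
      rw [if_pos rfl]
      have ih0 := ih (s+1) 0
      simp only [List.drop_zero] at ih0
      cases m with
      | zero =>
        simp only [List.drop_zero, List.mem_cons, ih0]
        constructor
        · rintro (rfl | ⟨k, hk, rfl, hc, -⟩)
          · exact ⟨0, by simp⟩
          · exact ⟨k+1, by simpa using hk, by push_cast; ring, by simpa using hc, by simp⟩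
        · rintro ⟨k, hk, rfl, hc, -⟩
          cases k with
          | zero => left; simp
          | succ k' =>
            right
            exact ⟨k', by simpa using hk, by push_cast; ring, by simpa using hc, by simp⟩
      | succ m' =>
        rw [List.drop_succ_cons, ih]
        constructor
        · rintro ⟨k, hk, rfl, hc, hcnt⟩
          refine ⟨k+1, by simpa using hk, by push_cast; ring, by simpa using hc, ?_⟩
          simpa [List.count_cons, List.take_succ_cons] using Nat.succ_le_succ hcnt
        · rintro ⟨k, hk, rfl, hc, hcnt⟩
          cases k with
          | zero => simp at hcnt
          | succ k' =>
            refine ⟨k', by simpa using hk, by push_cast; ring, by simpa using hc, ?_⟩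
            have : m' + 1 ≤ (xs.take k').count x + 1 := by
              simpa [List.take_succ_cons, List.count_cons] using hcnt
            omega
    · rw [if_neg hx, ih]
      constructor
      · rintro ⟨k, hk, rfl, hc, hcnt⟩
        refine ⟨k+1, by simpa using hk, by push_cast; ring, by simpa using hc, ?_⟩
        simpa [List.take_succ_cons, List.count_cons, hx] using hcnt
      · rintro ⟨k, hk, rfl, hc, hcnt⟩
        cases k with
        | zero => simp at hc; exact absurd hc hx
        | succ k' =>
          refine ⟨k', by simpa using hk, by push_cast; ring, by simpa using hc, ?_⟩
          simpa [List.take_succ_cons, List.count_cons, hx] using hcnt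

theorem pvIdxs_pairwise (u : List Char) (c : Char) (s : Int) :
    (pvIdxs u c s).Pairwise (· < ·) := by
  exact List.Pairwise.map _ (fun a b h => h) ((PySem.List.pairwise_lt_enumerate u s).filter _)

theorem pvInner (L : List Int) (cs : List Char)
    (hnd : L.Pairwise (· < ·)) (hb : ∀ j ∈ L, 0 ≤ j ∧ j.toNat < cs.length) :
    (L.foldl (fun cs j => PySem.List.pySetD cs j (PySem.Chars.lowerChar (PySem.List.pyGetD cs j ' '))) cs).length = cs.length ∧
    ∀ t : Nat, t < cs.length →
      (L.foldl (fun cs j => PySem.List.pySetD cs j (PySem.Chars.lowerChar (PySem.List.pyGetD cs j ' '))) cs).getD t ' '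
        = if (t:Int) ∈ L then PySem.Chars.lowerChar (cs.getD t ' ') else cs.getD t ' ' := by
  induction L generalizing cs with
  | nil => simp
  | cons j0 tl ih =>
    obtain ⟨hj0, hlt⟩ := hb j0 (List.mem_cons_self ..)
    have hset : PySem.List.pySetD cs j0 (PySem.Chars.lowerChar (PySem.List.pyGetD cs j0 ' '))
        = cs.set j0.toNat (PySem.Chars.lowerChar (cs.getD j0.toNat ' ')) := by
      rw [PySem.List.pySetD_of_nonneg _ _ hj0, PySem.List.pyGetD_of_nonneg _ _ hj0]
    have hlen' : (cs.set j0.toNat (PySem.Chars.lowerChar (cs.getD j0.toNat ' '))).length = cs.length := by simp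
    have htl := ih (cs.set j0.toNat (PySem.Chars.lowerChar (cs.getD j0.toNat ' ')))
      (hnd.sublist (List.sublist_cons_self ..))
      (fun j hj => by rw [hlen']; exact hb j (List.mem_cons_of_mem _ hj))
    rw [List.foldl_cons, hset]
    refine ⟨htl.1.trans hlen', fun t ht => ?_⟩
    rw [htl.2 t (by rw [hlen']; exact ht)]
    have hgtl : ∀ x ∈ tl, j0 < x := (List.pairwise_cons.mp hnd).1
    by_cases heq : t = j0.toNat
    · have hmemtl : (t:Int) ∉ tl := by
        intro hmem
        have := hgtl _ hmem
        omega
      have hmem : (t:Int) ∈ j0 :: tl := by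
        have : (t:Int) = j0 := by omega
        simp [this]
      rw [if_neg hmemtl, if_pos hmem]
      subst heq
      simp [List.getD_eq_getElem?_getD, ht]
    · have hne : (t:Int) ≠ j0 := by omega
      have hne' : ¬ (j0.toNat = t) := fun h => heq h.symm
      have hcs' : (cs.set j0.toNat (PySem.Chars.lowerChar (cs.getD j0.toNat ' '))).getD t ' ' = cs.getD t ' ' := by
        simp [List.getD_eq_getElem?_getD, hne']
      rw [hcs']
      by_cases hm : (t:Int) ∈ tl
      · rw [if_pos hm, if_pos (List.mem_cons_of_mem _ hm)]
      · rw [if_neg hm, if_neg (by simp [hne, hm])]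

theorem pvOuter (u b : List Char) (cl done : List Char)
    (hnd : (done ++ cl).Nodup) (cs : List Char) (hlen : cs.length = u.length)
    (hinv : ∀ t, t < u.length → cs.getD t ' ' =
      if u.getD t ' ' ∈ done ∧ b.count (u.getD t ' ') ≤ (u.take t).count (u.getD t ' ')
      then PySem.Chars.lowerChar (u.getD t ' ') else u.getD t ' ') :
    (cl.foldl (fun (cs : List Char) c =>
        ((((PySem.List.enumerate u 0).filter (fun p => p.2 == c)).map (·.1)).drop (b.count c)).foldl
          (fun cs j => PySem.List.pySetD cs j (PySem.Chars.lowerChar (PySem.List.pyGetD cs j ' '))) cs) cs).length = u.length ∧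
    ∀ t, t < u.length →
      (cl.foldl (fun (cs : List Char) c =>
        ((((PySem.List.enumerate u 0).filter (fun p => p.2 == c)).map (·.1)).drop (b.count c)).foldl
          (fun cs j => PySem.List.pySetD cs j (PySem.Chars.lowerChar (PySem.List.pyGetD cs j ' '))) cs) cs).getD t ' '
        = if u.getD t ' ' ∈ done ++ cl ∧ b.count (u.getD t ' ') ≤ (u.take t).count (u.getD t ' ')
          then PySem.Chars.lowerChar (u.getD t ' ') else u.getD t ' ' := by
  induction cl generalizing done cs with
  | nil =>
    refine ⟨hlen, fun t ht => ?_⟩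
    rw [List.foldl_nil, hinv t ht]; simp
  | cons c tl ih =>
    rw [List.foldl_cons]
    have hL : (((PySem.List.enumerate u 0).filter (fun p => p.2 == c)).map (·.1)) = pvIdxs u c 0 := rfl
    set L := (pvIdxs u c 0).drop (b.count c) with hLdef
    rw [hL]
    have hmemL : ∀ j : Int, j ∈ L ↔ ∃ k : Nat, k < u.length ∧ j = (k:Int) ∧ u.getD k ' ' = c ∧ b.count c ≤ (u.take k).count c := by
      intro j
      rw [hLdef, pvIdxs_mem_drop]
      simp
    have hpw : L.Pairwise (· < ·) := (pvIdxs_pairwise u c 0).sublist (List.drop_sublist _ _)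
    have hbnd : ∀ j ∈ L, 0 ≤ j ∧ j.toNat < cs.length := by
      intro j hj
      obtain ⟨k, hk, rfl, -, -⟩ := (hmemL j).mp hj
      constructor
      · positivity
      · rw [hlen]; simpa using hk
    have hin := pvInner L cs hpw hbnd
    have hmemLt : ∀ t : Nat, t < u.length →
        ((t:Int) ∈ L ↔ (u.getD t ' ' = c ∧ b.count c ≤ (u.take t).count c)) := by
      intro t ht
      rw [hmemL]
      constructor
      · rintro ⟨k, hk, hkt, h1, h2⟩
        have : k = t := by omega
        subst this; exact ⟨h1, h2⟩
      · rintro ⟨h1, h2⟩; exact ⟨t, ht, rfl, h1, h2⟩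
    have hcnotdone : c ∉ done := by
      intro hc
      rcases List.nodup_append.mp hnd with ⟨-, -, hdisj⟩
      exact hdisj c hc c (List.mem_cons_self ..) rfl
    have hnd' : ((done ++ [c]) ++ tl).Nodup := by
      simpa using hnd
    have := ih (done ++ [c])
      hnd'
      _ (hin.1.trans hlen)
      (fun t ht => by
        rw [hin.2 t (by rw [hlen]; exact ht)]
        by_cases hl : (t:Int) ∈ L
        · obtain ⟨h1, h2⟩ := (hmemLt t ht).mp hl
          rw [if_pos hl, hinv t ht]
          rw [if_neg (by rw [h1]; exact fun hcon => hcnotdone hcon.1)]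
          rw [if_pos (by rw [h1]; exact ⟨List.mem_append.mpr (Or.inr (List.mem_cons_self ..)), h2⟩)]
        · rw [if_neg hl, hinv t ht]
          have hnc : ¬ (u.getD t ' ' = c ∧ b.count c ≤ (u.take t).count c) := fun h => hl ((hmemLt t ht).mpr h)
          by_cases hdone : u.getD t ' ' ∈ done ∧ b.count (u.getD t ' ') ≤ (u.take t).count (u.getD t ' ')
          · rw [if_pos hdone, if_pos ⟨List.mem_append.mpr (Or.inl hdone.1), hdone.2⟩]
          · rw [if_neg hdone, if_neg (by
              rintro ⟨hm, hcnt⟩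
              rcases List.mem_append.mp hm with h | h
              · exact hdone ⟨h, hcnt⟩
              · have h' : u.getD t ' ' = c := by simpa using h
                exact hnc ⟨h', by rwa [h'] at hcnt⟩)])
    refine ⟨this.1, fun t ht => ?_⟩
    rw [this.2 t ht]
    simp only [List.append_assoc, List.singleton_append]

theorem letter_repeat_error_message_B_canon (user_word base_word : String) :
    letter_repeat_error_message_alt user_word base_word
      = "ошибка: " ++ String.ofList (pvCanon user_word.toList base_word.toList) := by
  unfold letter_repeat_error_message_alt
  set u := user_word.toList
  set b := base_word.toList
  have hslice : ∀ c : Char,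
      PySem.List.slice (((PySem.List.enumerate u 0).filter (fun p => p.2 == c)).map (·.1))
        (some ((b.count c : Nat) : Int)) none
      = (((PySem.List.enumerate u 0).filter (fun p => p.2 == c)).map (·.1)).drop (b.count c) := by
    intro c
    exact PySem.List.slice_from_natCast _ _
  simp only [hslice]
  have hout := pvOuter u b (PySem.List.dedup u) [] (by simp) u rfl
    (by intro t ht; simp)
  congr 1
  congr 1
  apply List.ext_getElem
  · rw [hout.1]; simp [pvCanon]
  · intro t h1 h2
    have ht : t < u.length := by rwa [hout.1] at h1
    have hgd := hout.2 t ht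
    rw [List.getD_eq_getElem?_getD, List.getElem?_eq_getElem h1] at hgd
    simp only [Option.getD_some] at hgd
    rw [hgd]
    have hcanon : (pvCanon u b)[t] = pvCanonAt u b t := by
      simp [pvCanon]
    rw [hcanon, pvCanonAt]
    have hmem : u.getD t ' ' ∈ ([] : List Char) ++ PySem.List.dedup u := by
      rw [List.nil_append, PySem.List.mem_dedup]
      rw [List.getD_eq_getElem?_getD, List.getElem?_eq_getElem ht]
      exact List.getElem_mem ht
    by_cases h : List.count (u.getD t ' ') b ≤ List.count (u.getD t ' ') (List.take t u)
    · rw [if_pos ⟨hmem, h⟩, if_pos h]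
    · rw [if_neg (fun hc => h hc.2), if_neg h]

def pvStepA (st : String × List Char) (i : Int) : String × List Char :=
  let c := (PySem.Str.pyGet? st.1 i).getD ' '
  if c ∈ st.2 then
    (st.1, (PySem.List.remove? st.2 c).getD st.2)
  else
    (PySem.Str.slice st.1 none (some i)
       ++ String.ofList [PySem.Chars.lowerChar c]
       ++ PySem.Str.slice st.1 (some (i + 1)) none,
     st.2)

theorem pvAloop (user_word base_word : String) (i : Nat) (hi : i ≤ user_word.toList.length) :
    ((PySem.List.pyRange 0 (i : Int) 1).foldl pvStepA (user_word, base_word.toList)).1.toList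
      = (List.range i).map (pvCanonAt user_word.toList base_word.toList) ++ user_word.toList.drop i ∧
    ∀ c : Char,
      ((PySem.List.pyRange 0 (i : Int) 1).foldl pvStepA (user_word, base_word.toList)).2.count c
        = base_word.toList.count c - (user_word.toList.take i).count c := by
  set u := user_word.toList with hu
  set b := base_word.toList with hb
  induction i with
  | zero =>
    simp [hu]
  | succ i ih =>
    have hilt : i < u.length := by omega
    obtain ⟨ih1, ih2⟩ := ih (by omega)
    set st := ((PySem.List.pyRange 0 (i : Int) 1).foldl pvStepA (user_word, b)) with hst
    have hrange : PySem.List.pyRange 0 ((i+1 : Nat) : Int) 1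
        = PySem.List.pyRange 0 (i : Int) 1 ++ [(i : Int)] := by
      push_cast
      exact PySem.List.pyRange_one_succ_right (by positivity)
    rw [hrange, List.foldl_append, List.foldl_cons, List.foldl_nil, ← hst]
    -- the character read at position i
    have hplen : ((List.range i).map (pvCanonAt u b)).length = i := by simp
    have hchar : (PySem.Str.pyGet? st.1 (i : Int)).getD ' ' = u.getD i ' ' := by
      rw [PySem.Str.pyGet?_natCast, ih1]
      rw [List.getElem?_append_right (by omega)]
      rw [hplen, List.getElem?_drop]
      rw [Nat.sub_self, Nat.add_zero, List.getElem?_eq_getElem hilt]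
      rw [List.getD_eq_getElem?_getD, List.getElem?_eq_getElem hilt]
    have htake : u.take (i+1) = u.take i ++ [u.getD i ' '] := by
      rw [List.take_add_one, List.getElem?_eq_getElem hilt]
      rw [List.getD_eq_getElem?_getD, List.getElem?_eq_getElem hilt]
      rfl
    unfold pvStepA
    simp only [hchar]
    by_cases hmem : u.getD i ' ' ∈ st.2
    · rw [if_pos hmem]
      have hcntpos : 0 < st.2.count (u.getD i ' ') := List.count_pos_iff.mpr hmem
      rw [ih2] at hcntpos
      have hlt : (u.take i).count (u.getD i ' ') < b.count (u.getD i ' ') := by omega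
      have hcan : pvCanonAt u b i = u.getD i ' ' := by
        rw [pvCanonAt, if_neg (by omega)]
      constructor
      · rw [ih1, List.range_succ, List.map_append, List.map_cons, List.map_nil, hcan]
        rw [List.drop_eq_getElem_cons hilt]
        rw [List.getD_eq_getElem?_getD, List.getElem?_eq_getElem hilt]
        simp
      · intro c
        rw [PySem.List.remove?_eq_some_erase _ _ hmem, Option.getD_some]
        rw [List.count_erase, ih2, htake, List.count_append]
        by_cases hc : c = u.getD i ' '
        · subst hc
          simp only [beq_self_eq_true, if_true, List.count_singleton]
          omega
        · have hne : ¬ ((u.getD i ' ') = c) := fun h => hc h.symm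
          simp only [beq_iff_eq, if_false, List.count_singleton, hne]
          omega
    · rw [if_neg hmem]
      have hcntz : st.2.count (u.getD i ' ') = 0 := by
        by_contra h
        exact hmem (List.count_pos_iff.mp (Nat.pos_of_ne_zero h))
      rw [ih2] at hcntz
      have hge : b.count (u.getD i ' ') ≤ (u.take i).count (u.getD i ' ') := by omega
      have hcan : pvCanonAt u b i = PySem.Chars.lowerChar (u.getD i ' ') := by
        rw [pvCanonAt, if_pos hge]
      constructor
      · simp only [String.toList_append]
        have h1 : (PySem.Str.slice st.1 none (some (i : Int))).toList
            = (List.range i).map (pvCanonAt u b) := by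
          simp only [PySem.Str.toList_slice, PySem.Chars.slice_eq_listSlice]
          rw [PySem.List.slice_to_natCast, ih1]
          rw [List.take_append_of_le_length (by omega), ← hplen]
          simp
        have h2 : (PySem.Str.slice st.1 (some ((i : Int) + 1)) none).toList = u.drop (i+1) := by
          simp only [PySem.Str.toList_slice, PySem.Chars.slice_eq_listSlice]
          have : ((i : Int) + 1) = (((i+1 : Nat)) : Int) := by push_cast; ring
          rw [this, PySem.List.slice_from_natCast, ih1, List.drop_append]
          rw [hplen, List.drop_drop]
          have : i + 1 - i = 1 := by omega
          rw [this]
          have : (List.map (pvCanonAt u b) (List.range i)).drop (i+1) = [] := by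
            apply List.drop_eq_nil_of_le
            omega
          rw [this, List.nil_append]
        rw [h1, h2, List.range_succ, List.map_append, List.map_cons, List.map_nil, hcan]
        simp
      · intro c
        rw [ih2, htake, List.count_append]
        by_cases hc : c = u.getD i ' '
        · subst hc
          simp only [List.count_singleton, beq_self_eq_true, if_true]
          omega
        · have hne : ¬ (u.getD i ' ' = c) := fun h => hc h.symm
          simp only [List.count_singleton, beq_iff_eq, hne, if_false]
          omega

theorem letter_repeat_error_message_A_canon (user_word base_word : String) :
    letter_repeat_error_message user_word base_word
      = "ошибка: " ++ String.ofList (pvCanon user_word.toList base_word.toList) := by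
  unfold letter_repeat_error_message
  have hlam : (fun (st : String × List Char) i =>
        let c := (PySem.Str.pyGet? st.1 i).getD ' '
        if c ∈ st.2 then
          (st.1, (PySem.List.remove? st.2 c).getD st.2)
        else
          (PySem.Str.slice st.1 none (some i)
             ++ String.ofList [PySem.Chars.lowerChar c]
             ++ PySem.Str.slice st.1 (some (i + 1)) none,
           st.2)) = pvStepA := rfl
  have hlen : PySem.Str.len user_word = ((user_word.toList.length : Nat) : Int) := by
    simp
  rw [hlam, hlen]
  have hA := (pvAloop user_word base_word user_word.toList.length le_rfl).1
  rw [List.drop_length, List.append_nil] at hA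
  show "ошибка: " ++ ((PySem.List.pyRange 0 ((user_word.toList.length : Nat) : Int) 1).foldl pvStepA
      (user_word, base_word.toList)).1 = _
  congr 1
  rw [← String.ofList_toList (s := ((PySem.List.pyRange 0 ((user_word.toList.length : Nat) : Int) 1).foldl pvStepA
      (user_word, base_word.toList)).1), hA]
  rfl

-- ===== VERDICT (by name: the statement is the Claim_ definition above) =====
theorem letter_repeat_error_message_spec : Claim_equal_letter_repeat_error_message := by
  intro u b _
  unfold Spec_letter_repeat_error_message
  rw [letter_repeat_error_message_A_canon, letter_repeat_error_message_B_canon]
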